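-- pv_equiv track=rewrite | github.com/beedev/simple-ai-provenance | src/mcp_ai_commit/ai_client.py | _detect_conventional_type
-- ===== SOURCE A (Python) =====
-- def _detect_conventional_type(message: str) -> str:
--     """Detect conventional commit type."""
--     conventional_types = [
--         "feat", "fix", "docs", "style", "refactor",
--         "perf", "test", "build", "ci", "chore"
--     ]
--
--     message_lower = message.lower()
--     for commit_type in conventional_types:
--         if message_lower.startswith(f"{commit_type}:") or message_lower.startswith(f"{commit_type}("):
--             return commit_type
--
--     return "unknown"
-- ===== SOURCE B (Python) =====
-- def _detect_conventional_type(message: str) -> str: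
--     """Detect conventional commit type."""
--     conventional_types = frozenset({
--         "feat", "fix", "docs", "style", "refactor",
--         "perf", "test", "build", "ci", "chore"
--     })
--
--     m = message.lower()
--     i = m.find(":")
--     j = m.find("(")
--     if i == -1:
--         d = j
--     elif j == -1:
--         d = i
--     else:
--         d = min(i, j)
--     if d != -1 and m[:d] in conventional_types:
--         return m[:d]
--     return "unknown"
-- ===== Notes on version B (the rewrite author's own statement) =====
-- stated objective: idiomatic
-- what changed: Instead of scanning ten candidate types and testing two startswith prefixes for each, B extracts the prefix before the earliest ':'/'(' delimiter once and checks membership in a frozenset.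
import Mathlib
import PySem

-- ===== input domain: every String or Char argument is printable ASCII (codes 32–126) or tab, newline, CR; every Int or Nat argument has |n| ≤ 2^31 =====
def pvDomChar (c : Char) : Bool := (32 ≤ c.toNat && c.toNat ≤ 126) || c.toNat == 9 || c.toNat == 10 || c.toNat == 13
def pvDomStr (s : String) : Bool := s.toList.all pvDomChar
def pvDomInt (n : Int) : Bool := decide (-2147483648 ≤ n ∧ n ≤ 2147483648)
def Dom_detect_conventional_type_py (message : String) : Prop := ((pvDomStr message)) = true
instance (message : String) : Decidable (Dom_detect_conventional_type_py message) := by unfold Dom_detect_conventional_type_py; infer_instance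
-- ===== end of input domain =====

-- B replaces A's scan over ten candidate types (two startswith tests each) by one prefix
-- extraction up to the earliest ':'/'(' delimiter plus a set-membership test (idiomatic).

-- ===== PORT A =====
-- the loop 'for commit_type in conventional_types: …' of A
def pvLoopA (ml : String) : List String → String
  | [] => "unknown"
  | t :: rest =>
      if PySem.Str.startswith ml (t ++ ":") || PySem.Str.startswith ml (t ++ "(") then t
      else pvLoopA ml rest

def detect_conventional_type_py (message : String) : String :=
  let conventional_types := ["feat", "fix", "docs", "style", "refactor",
                             "perf", "test", "build", "ci", "chore"]
  let message_lower := PySem.Str.lower message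
  pvLoopA message_lower conventional_types

-- ===== PORT B =====
def detect_conventional_type_py_alt (message : String) : String :=
  let conventional_types : PySem.Set String :=
    PySem.Set.ofList ["feat", "fix", "docs", "style", "refactor",
                      "perf", "test", "build", "ci", "chore"]
  let m := PySem.Str.lower message
  let i := PySem.Str.find m ":"
  let j := PySem.Str.find m "("
  let d := if i = -1 then j else if j = -1 then i else min i j
  if d ≠ -1 ∧ PySem.Set.contains conventional_types (PySem.Str.slice m none (some d)) then
    PySem.Str.slice m none (some d)
  else "unknown"

-- ===== PRECONDITION & SPEC =====
def Spec_detect_conventional_type_py (message : String) (out : String) : Prop := out = detect_conventional_type_py_alt message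
instance (message : String) (out : String) : Decidable (Spec_detect_conventional_type_py message out) := by unfold Spec_detect_conventional_type_py; infer_instance

-- ===== CLAIM (what is proved, stated in full; the proofs are below) =====
def Claim_equal_detect_conventional_type_py : Prop := ∀ (message : String), Dom_detect_conventional_type_py message → Spec_detect_conventional_type_py message (detect_conventional_type_py message)

-- ===== LEMMAS AND PROOFS =====

-- a character that ends a candidate prefix
def pvDelim (c : Char) : Bool := c == ':' || c == '('

-- first index satisfying p, as Python's find result (-1 if absent)
def pvF (p : Char → Bool) (L : List Char) : Int :=
  match L.findIdx? p with | none => -1 | some n => n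

theorem pvF_cons (p : Char → Bool) (a : Char) (L : List Char) :
    pvF p (a :: L) = if p a then 0 else if pvF p L = -1 then -1 else pvF p L + 1 := by
  unfold pvF
  rw [List.findIdx?_cons]
  cases h : L.findIdx? p <;> by_cases hp : p a <;> simp [hp, h]

theorem pvF_ge (p : Char → Bool) (L : List Char) : -1 ≤ pvF p L := by
  unfold pvF; cases h : L.findIdx? p <;> simp

theorem pref_single (L : List Char) (i : Nat) (c : Char) :
    [c] <+: L.drop i ↔ L[i]? = some c := by
  constructor
  · rintro ⟨t, ht⟩
    have : (L.drop i).head? = some c := by rw [← ht]; rfl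
    rwa [List.head?_drop] at this
  · intro h
    have hi : i < L.length := by
      by_contra hc
      rw [List.getElem?_eq_none (by omega)] at h; simp at h
    have hd : L.drop i = L[i] :: L.drop (i + 1) := List.drop_eq_getElem_cons hi
    have hc : L[i] = c := by
      have := List.getElem?_eq_getElem hi; rw [this] at h; exact Option.some.inj h
    exact ⟨L.drop (i + 1), by rw [hd, hc]; rfl⟩

-- PySem's substring find, on a one-character needle, is the first index of that character
theorem find_single (L : List Char) (c : Char) :
    PySem.Chars.find L [c] = pvF (fun x => x == c) L := by
  unfold pvF
  cases h : L.findIdx? (fun x => x == c) with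
  | none =>
    simp only [List.findIdx?_eq_none_iff] at h
    rw [PySem.Chars.find_eq_neg_one_iff]
    intro hinf
    have hc : c ∈ L := hinf.subset (by simp)
    have := h c hc; simp at this
  | some n =>
    obtain ⟨hlt, hget, hmin⟩ := List.findIdx?_eq_some_iff_getElem.mp h
    simp only [beq_iff_eq] at hget
    have hne : PySem.Chars.find L [c] ≠ -1 := by
      rw [PySem.Chars.find_ne_neg_one_iff]
      exact ⟨L.take n, L.drop (n+1), by
        rw [← hget]
        rw [show L.take n ++ [L[n]] ++ L.drop (n+1) = L.take n ++ (L[n] :: L.drop (n+1)) by simp]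
        rw [← List.drop_eq_getElem_cons hlt, List.take_append_drop]⟩
    have hspec := PySem.Chars.findFrom_natCast_spec L [c] 0 (by omega) (by simpa using hne)
    simp only [Nat.cast_zero, PySem.Chars.findFrom_zero] at hspec
    obtain ⟨h0, hpre, hm⟩ := hspec
    set f := PySem.Chars.find L [c] with hf
    have hgetf : L[f.toNat]? = some c := (pref_single L f.toNat c).mp hpre
    have h1 : ¬ (f.toNat < n) := by
      intro hlt2
      have := hmin f.toNat hlt2
      simp only [beq_iff_eq] at this
      have hfl : f.toNat < L.length := by
        by_contra hc2
        rw [List.getElem?_eq_none (by omega)] at hgetf; simp at hgetf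
      rw [List.getElem?_eq_getElem hfl] at hgetf
      exact this (Option.some.inj hgetf)
    have h2 : ¬ (n < f.toNat) := by
      intro hlt2
      exact hm n (by omega) (by omega) ((pref_single L n c).mpr (by rw [List.getElem?_eq_getElem hlt]; exact congrArg some hget))
    show f = (n : Int)
    omega

-- B's earliest-of-the-two-finds computation is the first index of a delimiter
theorem pvComb (L : List Char) :
    (if pvF (fun x => x == ':') L = -1 then pvF (fun x => x == '(') L
     else if pvF (fun x => x == '(') L = -1 then pvF (fun x => x == ':') L
     else min (pvF (fun x => x == ':') L) (pvF (fun x => x == '(') L)) = pvF pvDelim L := by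
  induction L with
  | nil => simp [pvF]
  | cons a L ih =>
    have h1 := pvF_cons (fun x => x == ':') a L
    have h2 := pvF_cons (fun x => x == '(') a L
    have h3 := pvF_cons pvDelim a L
    have g1 := pvF_ge (fun x => x == ':') L
    have g2 := pvF_ge (fun x => x == '(') L
    have g3 := pvF_ge pvDelim L
    rw [h1, h2, h3]
    by_cases ha : a = ':' <;> by_cases hb : a = '(' <;>
      simp [ha, hb, pvDelim] <;> split_ifs at ih ⊢ <;> omega

theorem findIdx_append (t r : List Char) (c : Char) (ht : ∀ x ∈ t, pvDelim x = false)
    (hc : pvDelim c = true) :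
    (t ++ c :: r).findIdx? pvDelim = some t.length := by
  induction t with
  | nil => simp [List.findIdx?_cons, hc]
  | cons a t ih =>
    have ha := ht a (by simp)
    rw [List.cons_append, List.findIdx?_cons, ha]
    simp [ih (fun x hx => ht x (by simp [hx]))]

-- A's per-candidate test holds iff t is exactly the text before the first delimiter
theorem cond_iff (L t : List Char) (ht : ∀ x ∈ t, pvDelim x = false) :
    ((PySem.Chars.startswith L (t ++ [':']) || PySem.Chars.startswith L (t ++ ['('])) = true) ↔
      (∃ n, L.findIdx? pvDelim = some n ∧ L.take n = t) := by
  constructor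
  · intro h
    rw [Bool.or_eq_true, PySem.Chars.startswith_iff, PySem.Chars.startswith_iff] at h
    have : ∃ c, pvDelim c = true ∧ (t ++ [c]) <+: L := by
      rcases h with h | h
      · exact ⟨':', by decide, h⟩
      · exact ⟨'(', by decide, h⟩
    obtain ⟨c, hc, r, hr⟩ := this
    refine ⟨t.length, ?_, ?_⟩
    · rw [← hr, show t ++ [c] ++ r = t ++ c :: r by simp]
      exact findIdx_append t r c ht hc
    · rw [← hr]; simp
  · rintro ⟨n, hn, rfl⟩
    obtain ⟨hlt, hget, -⟩ := List.findIdx?_eq_some_iff_getElem.mp hn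
    have hL : L = L.take n ++ L[n] :: L.drop (n + 1) := by
      rw [← List.drop_eq_getElem_cons hlt, List.take_append_drop]
    rw [Bool.or_eq_true, PySem.Chars.startswith_iff, PySem.Chars.startswith_iff]
    have hcases : L[n] = ':' ∨ L[n] = '(' := by
      unfold pvDelim at hget
      rcases (Bool.or_eq_true _ _).mp hget with h | h
      · exact Or.inl (beq_iff_eq.mp h)
      · exact Or.inr (beq_iff_eq.mp h)
    rcases hcases with he | he
    · exact Or.inl ⟨L.drop (n + 1), by rw [← he]; simpa using hL.symm⟩
    · exact Or.inr ⟨L.drop (n + 1), by rw [← he]; simpa using hL.symm⟩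

-- A's loop over delimiter-free candidates = extract-prefix-then-look-up
theorem loopA_eq (ml : String) (ts : List String)
    (h : ∀ t ∈ ts, ∀ x ∈ t.toList, pvDelim x = false) :
    pvLoopA ml ts =
      (match ml.toList.findIdx? pvDelim with
       | none => "unknown"
       | some n => if String.ofList (ml.toList.take n) ∈ ts then String.ofList (ml.toList.take n)
                   else "unknown") := by
  induction ts with
  | nil => cases h' : ml.toList.findIdx? pvDelim <;> simp [pvLoopA, h']
  | cons t rest ih =>
    have hcolon : (":" : String).toList = [':'] := by decide
    have hparen : ("(" : String).toList = ['('] := by decide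
    have hb : (PySem.Str.startswith ml (t ++ ":") || PySem.Str.startswith ml (t ++ "(")) =
        (PySem.Chars.startswith ml.toList (t.toList ++ [':']) ||
         PySem.Chars.startswith ml.toList (t.toList ++ ['('])) := by
      simp [PySem.Str.startswith_eq, hcolon, hparen]
    have hcond := cond_iff ml.toList t.toList (h t (by simp))
    rw [← hb] at hcond
    have hrest := ih (fun u hu => h u (by simp [hu]))
    cases hfi : ml.toList.findIdx? pvDelim with
    | none =>
      rw [pvLoopA, if_neg, hrest]
      · simp only [hfi]
      · intro hc
        obtain ⟨n, hn, -⟩ := hcond.mp (by exact hc)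
        rw [hfi] at hn; simp at hn
    | some n =>
      by_cases he : String.ofList (ml.toList.take n) = t
      · have htk : ml.toList.take n = t.toList := by
          rw [← he]; simp
        rw [pvLoopA, if_pos (hcond.mpr ⟨n, hfi, htk⟩)]
        simp only [hfi]
        simp [he]
      · have hcf : ¬ (PySem.Str.startswith ml (t ++ ":") || PySem.Str.startswith ml (t ++ "(")) = true := by
          intro hc
          obtain ⟨m, hm, htk⟩ := hcond.mp hc
          rw [hfi] at hm
          obtain rfl : n = m := Option.some.inj hm
          exact he (by rw [htk]; simp [String.ofList_toList])
        rw [pvLoopA, if_neg hcf, hrest]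
        simp only [hfi, List.mem_cons]
        by_cases hm : String.ofList (ml.toList.take n) ∈ rest <;> simp [hm, he]

-- B computed into the same extract-prefix-then-look-up form
theorem alt_eq (message : String) :
    detect_conventional_type_py_alt message =
      (match (PySem.Str.lower message).toList.findIdx? pvDelim with
       | none => "unknown"
       | some n =>
          if String.ofList ((PySem.Str.lower message).toList.take n) ∈
              ["feat", "fix", "docs", "style", "refactor", "perf", "test", "build", "ci", "chore"]
            then String.ofList ((PySem.Str.lower message).toList.take n)
          else "unknown") := by
  unfold detect_conventional_type_py_alt
  dsimp only
  have hcolon : (":" : String).toList = [':'] := by decide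
  have hparen : ("(" : String).toList = ['('] := by decide
  have hi : PySem.Str.find (PySem.Str.lower message) ":" = pvF (fun x => x == ':') (PySem.Str.lower message).toList := by
    rw [PySem.Str.find_eq, hcolon, find_single]
  have hj : PySem.Str.find (PySem.Str.lower message) "(" = pvF (fun x => x == '(') (PySem.Str.lower message).toList := by
    rw [PySem.Str.find_eq, hparen, find_single]
  rw [hi, hj, pvComb]
  cases hfi : (PySem.Str.lower message).toList.findIdx? pvDelim with
  | none =>
    have hd : pvF pvDelim (PySem.Str.lower message).toList = -1 := by unfold pvF; rw [hfi]
    rw [hd]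
    simp
  | some n =>
    have hd : pvF pvDelim (PySem.Str.lower message).toList = (n : Int) := by unfold pvF; rw [hfi]
    rw [hd]
    have hslice : PySem.Str.slice (PySem.Str.lower message) none (some (n : Int)) =
        String.ofList ((PySem.Str.lower message).toList.take n) := by
      apply String.toList_inj.mp
      rw [PySem.Str.toList_slice, PySem.Chars.slice_eq_listSlice, PySem.List.slice_to_natCast]
      simp
    rw [hslice]
    show _ = if String.ofList ((PySem.Str.lower message).toList.take n) ∈
        ["feat", "fix", "docs", "style", "refactor", "perf", "test", "build", "ci", "chore"]
      then String.ofList ((PySem.Str.lower message).toList.take n) else "unknown"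
    by_cases hm : String.ofList ((PySem.Str.lower message).toList.take n) ∈
        ["feat", "fix", "docs", "style", "refactor", "perf", "test", "build", "ci", "chore"]
    · rw [if_pos ⟨by omega, (PySem.Set.contains_iff _ _).mpr ((PySem.Set.mem_ofList _ _).mpr hm)⟩,
        if_pos hm]
    · rw [if_neg, if_neg hm]
      rintro ⟨-, hc⟩
      exact hm ((PySem.Set.mem_ofList _ _).mp ((PySem.Set.contains_iff _ _).mp hc))

-- ===== VERDICT (by name: the statement is the Claim_ definition above) =====
theorem detect_conventional_type_py_spec : Claim_equal_detect_conventional_type_py := by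
  intro message _
  unfold Spec_detect_conventional_type_py detect_conventional_type_py
  rw [loopA_eq _ _ (by intro t ht; fin_cases ht <;> simp [pvDelim]), alt_eq]
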